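-- pv_equiv track=rewrite | github.com/LekChaiCoding/PiqassoiQuHackSubmission_-2026-QuEra-Technical- | 7-16-testing.py | _greedy_unique_packing
-- ===== SOURCE A (Python) =====
-- from typing import Literal, List, Tuple, Optional, Sequence, cast, Iterable
-- from collections import deque, defaultdict
--
-- def _greedy_unique_packing(data: List[int]) -> List[List[int]]:
--     remaining = deque(data)
--     result = []
--
--     while remaining:
--         used = set()
--         group = []
--         i = 0
--         length = len(remaining)
--
--         while i < length:
--             item = remaining.popleft()
--             if item not in used:
--                 group.append(item)
--                 used.add(item)
--             else:
--                 remaining.append(item)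
--             i += 1
--
--         result.append(group)
--
--     return result
-- ===== SOURCE B (Python) =====
-- def _greedy_unique_packing(data):
--     result = []
--     count = {}
--     for item in data:
--         k = count.get(item, 0)
--         if k == len(result):
--             result.append([item])
--         else:
--             result[k].append(item)
--         count[item] = k + 1
--     return result
-- ===== Notes on version B (the rewrite author's own statement) =====
-- stated objective: faster
-- what changed: Replaces A's repeated deque passes (one pass per group, each rescanning and re-queuing duplicates) with a single pass that appends each item to result[k] where k is a per-value occurrence counter kept in a dict.
import Mathlib
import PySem

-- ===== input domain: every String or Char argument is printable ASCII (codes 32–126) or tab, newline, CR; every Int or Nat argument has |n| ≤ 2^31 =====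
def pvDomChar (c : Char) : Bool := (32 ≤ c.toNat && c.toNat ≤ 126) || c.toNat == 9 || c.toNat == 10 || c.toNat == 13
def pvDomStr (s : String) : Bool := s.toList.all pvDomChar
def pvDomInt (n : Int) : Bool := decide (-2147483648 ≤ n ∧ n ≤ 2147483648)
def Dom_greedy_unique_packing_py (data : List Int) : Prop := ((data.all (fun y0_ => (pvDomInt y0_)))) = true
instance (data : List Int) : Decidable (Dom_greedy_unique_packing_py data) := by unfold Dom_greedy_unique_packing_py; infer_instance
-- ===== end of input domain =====

-- B replaces A's repeated passes over a deque by one pass that drops each item into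
-- result[count-so-far[item]] using a per-value counter (objective: faster, O(n·m) → O(n)).

-- ===== PORT A =====
-- one iteration of the inner 'while i < length' loop: state = (used, group, new remaining)
def passStep (st : PySem.Set Int × List Int × List Int) (item : Int) :
    PySem.Set Int × List Int × List Int :=
  if item ∉ st.1 then (PySem.Set.add st.1 item, st.2.1 ++ [item], st.2.2)
  else (st.1, st.2.1, st.2.2 ++ [item])

-- termination: the new 'remaining' after a pass is strictly shorter (first item always joins the group)
theorem passStep_rest_len (xs : List Int) : ∀ (u : PySem.Set Int) (g nr : List Int),
    ((xs.foldl passStep (u, g, nr)).2.2).length ≤ nr.length + xs.length := by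
  induction xs with
  | nil => intro u g nr; simp
  | cons x xs ih =>
    intro u g nr
    simp only [List.foldl_cons, passStep]
    split
    all_goals refine le_trans (ih _ _ _) ?_
    all_goals simp
    all_goals omega

theorem pass_rest_lt (x : Int) (xs : List Int) :
    (((x :: xs).foldl passStep (PySem.Set.empty, [], [])).2.2).length < (x :: xs).length := by
  simp only [List.foldl_cons, passStep]
  have hx : x ∉ (PySem.Set.empty : PySem.Set Int) := by simp [PySem.Set.empty]
  rw [if_pos hx]
  have := passStep_rest_len xs (PySem.Set.add PySem.Set.empty x) ([] ++ [x]) []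
  simp at this ⊢
  omega

def greedy_unique_packing_py (data : List Int) : List (List Int) :=
  if _h : data = [] then []
  else
    let r := data.foldl passStep (PySem.Set.empty, [], [])
    r.2.1 :: greedy_unique_packing_py r.2.2
termination_by data.length
decreasing_by
  simp only [List.foldl_attach]
  cases data with
  | nil => exact absurd rfl _h
  | cons x xs => exact pass_rest_lt x xs

-- ===== PORT B =====
-- one iteration of B's 'for item in data' loop: state = (result, count)
def altStep (st : List (List Int) × PySem.Dict Int Int) (item : Int) :
    List (List Int) × PySem.Dict Int Int :=
  let k := st.2.getD item 0
  let res := if k = (st.1.length : Int) then st.1 ++ [[item]]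
             else st.1.modify k.toNat (fun g => g ++ [item])
  (res, st.2.insert item (k + 1))

def greedy_unique_packing_py_alt (data : List Int) : List (List Int) :=
  (data.foldl altStep ([], PySem.Dict.empty)).1

-- ===== PRECONDITION & SPEC =====
def Spec_greedy_unique_packing_py (data : List Int) (out : List (List Int)) : Prop := out = greedy_unique_packing_py_alt data
instance (data : List Int) (out : List (List Int)) : Decidable (Spec_greedy_unique_packing_py data out) := by unfold Spec_greedy_unique_packing_py; infer_instance

-- ===== CLAIM (what is proved, stated in full; the proofs are below) =====
def Claim_equal_greedy_unique_packing_py : Prop := ∀ (data : List Int), Dom_greedy_unique_packing_py data → Spec_greedy_unique_packing_py data (greedy_unique_packing_py data)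

-- ===== LEMMAS AND PROOFS =====

-- the counter component of B's fold counts occurrences
theorem altFold_count (xs : List Int) : ∀ (res : List (List Int)) (d : PySem.Dict Int Int) (x : Int),
    ((xs.foldl altStep (res, d)).2).getD x 0 = d.getD x 0 + (xs.count x : Int) := by
  induction xs with
  | nil => intro res d x; simp
  | cons a xs ih =>
    intro res d x
    simp only [List.foldl_cons, altStep]
    rw [ih]
    rw [PySem.Dict.getD_insert]
    by_cases hxa : x = a
    · subst hxa; simp; omega
    · simp [hxa, Ne.symm hxa]

-- abbreviation for the shape B's partial result takes relative to A's pass state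
def F (g nr : List Int) : List (List Int) :=
  if g = [] then [] else g :: (nr.foldl altStep ([], PySem.Dict.empty)).1

-- simulation: running B's loop from state F g nr tracks A's pass from state (u, g, nr)
theorem sim (xs : List Int) : ∀ (u : PySem.Set Int) (g nr : List Int) (d : PySem.Dict Int Int),
    (∀ x, x ∈ u ↔ x ∈ g) → (∀ x, x ∈ nr → x ∈ u) →
    (∀ x, d.getD x 0 = (if x ∈ u then (1 : Int) else 0) + (nr.count x : Int)) →
    (xs.foldl altStep (F g nr, d)).1
      = F ((xs.foldl passStep (u, g, nr)).2.1) ((xs.foldl passStep (u, g, nr)).2.2) := by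
  induction xs with
  | nil => intro u g nr d _ _ _; rfl
  | cons x xs ih =>
    intro u g nr d h1 h2 h3
    simp only [List.foldl_cons]
    by_cases hx : x ∈ u
    · -- duplicate within this pass: A defers x, B drops it into a later group
      have hg : g ≠ [] := by
        intro e; exact absurd ((h1 x).mp hx) (by simp [e])
      have hpass : passStep (u, g, nr) x = (u, g, nr ++ [x]) := by
        simp [passStep, hx]
      have hk : d.getD x 0 = 1 + (nr.count x : Int) := by rw [h3]; simp [hx]
      have key : altStep (F g nr, d) x = (F g (nr ++ [x]), d.insert x (d.getD x 0 + 1)) := by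
        refine Prod.ext ?_ rfl
        set t := (nr.foldl altStep ([], PySem.Dict.empty)).1 with ht
        have hdn : (nr.foldl altStep ([], PySem.Dict.empty)).2.getD x 0 = (nr.count x : Int) := by
          rw [altFold_count]; simp
        have hFg : F g nr = g :: t := by rw [F, if_neg hg]
        rw [hFg]
        simp only [altStep]
        rw [hk]
        rw [F, if_neg hg, List.foldl_append,
            show nr.foldl altStep ([], PySem.Dict.empty)
               = (t, (nr.foldl altStep ([], PySem.Dict.empty)).2) from rfl]
        simp only [List.foldl_cons, List.foldl_nil, altStep]
        rw [hdn]
        by_cases hc : (nr.count x : Int) = (t.length : Int)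
        · rw [if_pos (by simp only [List.length_cons]; push_cast; omega), if_pos hc]; simp
        · rw [if_neg (by simp only [List.length_cons]; push_cast; omega), if_neg hc]
          rw [show (1 + (nr.count x : Int)).toNat = nr.count x + 1 by omega]
          simp [List.modify]
      rw [hpass, key]
      refine ih u g (nr ++ [x]) _ h1 ?_ ?_
      · intro y hy
        rcases List.mem_append.mp hy with hy | hy
        · exact h2 y hy
        · simp at hy; subst hy; exact hx
      · intro y
        rw [PySem.Dict.getD_insert]
        by_cases hyx : y = x
        · subst hyx
          rw [hk]
          simp [hx, List.count_append]
          omega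
        · rw [if_neg hyx, h3, List.count_append,
              List.count_eq_zero.mpr (by simp [hyx] : y ∉ [x])]
          simp
    · -- fresh value in this pass: A adds x to the group, B to result[0]'s current group
      have hnrx : x ∉ nr := fun hmem => hx (h2 x hmem)
      have hcnt : nr.count x = 0 := List.count_eq_zero.mpr hnrx
      have hpass : passStep (u, g, nr) x = (PySem.Set.add u x, g ++ [x], nr) := by
        simp [passStep, hx]
      have hk : d.getD x 0 = 0 := by rw [h3]; simp [hx, hcnt]
      have key : altStep (F g nr, d) x = (F (g ++ [x]) nr, d.insert x (d.getD x 0 + 1)) := by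
        refine Prod.ext ?_ rfl
        by_cases hg : g = []
        · have hnr : nr = [] := List.eq_nil_iff_forall_not_mem.mpr
            (fun y hy => by simpa [hg] using (h1 y).mp (h2 y hy))
          subst hg hnr
          simp [F, altStep, hk]
        · set t := (nr.foldl altStep ([], PySem.Dict.empty)).1 with ht
          have hFg : F g nr = g :: t := by rw [F, if_neg hg]
          rw [hFg]
          simp only [altStep]
          rw [hk]
          rw [if_neg (by simp only [List.length_cons]; push_cast; omega)]
          rw [F, if_neg (by simp : ¬ (g ++ [x] = []))]
          simp [List.modify, ht]
      rw [hpass, key]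
      refine ih (PySem.Set.add u x) (g ++ [x]) nr _ ?_ ?_ ?_
      · intro y
        rw [PySem.Set.mem_add]
        simp [h1 y]
      · intro y hy
        exact (PySem.Set.mem_add _ _ _).mpr (Or.inl (h2 y hy))
      · intro y
        rw [PySem.Dict.getD_insert]
        by_cases hyx : y = x
        · subst hyx
          rw [hk]
          simp [PySem.Set.mem_add, hcnt]
        · rw [if_neg hyx, h3]
          simp [PySem.Set.mem_add, hyx]

-- A's group component never shrinks to empty
theorem pass_group_ne (xs : List Int) : ∀ (u : PySem.Set Int) (g nr : List Int), g ≠ [] →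
    (xs.foldl passStep (u, g, nr)).2.1 ≠ [] := by
  induction xs with
  | nil => intro u g nr h; simpa
  | cons x xs ih =>
    intro u g nr h
    simp only [List.foldl_cons, passStep]
    split
    · exact ih _ _ _ (by simp)
    · exact ih _ _ _ h

-- the group of A's first pass is nonempty on nonempty input
theorem pass_group_ne0 (x : Int) (xs : List Int) :
    (((x :: xs).foldl passStep (PySem.Set.empty, [], [])).2.1) ≠ [] := by
  simp only [List.foldl_cons, passStep]
  rw [if_pos (by simp [PySem.Set.empty] : x ∉ (PySem.Set.empty : PySem.Set Int))]
  exact pass_group_ne xs _ _ _ (by simp)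

theorem eqAll (data : List Int) : greedy_unique_packing_py data = greedy_unique_packing_py_alt data := by
  rw [greedy_unique_packing_py]
  split
  · rename_i h; subst h; rfl
  · rename_i h
    have hsim := sim data PySem.Set.empty [] [] PySem.Dict.empty
      (by simp [PySem.Set.empty]) (by simp) (by simp [PySem.Set.empty])
    have halt : greedy_unique_packing_py_alt data
        = F ((data.foldl passStep (PySem.Set.empty, [], [])).2.1)
            ((data.foldl passStep (PySem.Set.empty, [], [])).2.2) := by
      rw [greedy_unique_packing_py_alt, ← hsim]; rfl
    cases data with
    | nil => exact absurd rfl h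
    | cons x xs =>
      show (((x :: xs).foldl passStep (PySem.Set.empty, [], [])).2.1)
          :: greedy_unique_packing_py (((x :: xs).foldl passStep (PySem.Set.empty, [], [])).2.2)
          = greedy_unique_packing_py_alt (x :: xs)
      rw [halt, F, if_neg (pass_group_ne0 x xs)]
      congr 1
      exact eqAll (((x :: xs).foldl passStep (PySem.Set.empty, [], [])).2.2)
termination_by data.length
decreasing_by exact pass_rest_lt x xs

-- ===== VERDICT (by name: the statement is the Claim_ definition above) =====
theorem greedy_unique_packing_py_spec : Claim_equal_greedy_unique_packing_py := by
  intro data _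
  unfold Spec_greedy_unique_packing_py
  exact eqAll data
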